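-- pv_equiv track=rewrite | github.com/debil-from-Russia/yandex.samostoyatelnaya | Химия просто.py | chemical_elements
-- ===== SOURCE A (Python) =====
-- def chemical_elements(molecule):
--     elements = []
--     true_elements = []
--
--     for letter in molecule:
--         if letter.isalpha() and letter not in elements:
--             elements.append(letter)
--     for i in range(len(elements)):
--         if elements[i].isupper():
--             if i==len(elements)-1:
--                 true_elements.append(elements[i])
--             elif elements[i+1].isupper():
--                 element = elements[i]
--                 true_elements.append(element)
--             elif elements[i+1].islower():
--                 element = elements[i]+elements[i+1]
--                 true_elements.append(element)
--         else:
--             continue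
--
--
--     return true_elements
-- ===== SOURCE B (Python) =====
-- def chemical_elements(molecule):
--     # One fused pass over the raw string: a 'seen' set replaces the membership
--     # list, and a pending-uppercase accumulator (look-behind) replaces A's
--     # staged index loop with lookahead and its i==last special case.
--     seen = set()
--     out = []
--     pending = None
--     for ch in molecule:
--         if not ch.isalpha() or ch in seen:
--             continue
--         seen.add(ch)
--         if ch.isupper():
--             if pending is not None:
--                 out.append(pending)
--             pending = ch
--         elif pending is not None:
--             out.append(pending + ch)
--             pending = None
--     if pending is not None:
--         out.append(pending)
--     return out
-- ===== Notes on version B (the rewrite author's own statement) =====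
-- stated objective: faster
-- what changed: A's two staged passes (membership-list dedup, then an index loop with i+1 lookahead and an i==last special case) are replaced by one fused pass over the raw string: a seen-set dedup inlined into a pending-uppercase look-behind state machine that emits tokens as it goes and flushes the pending uppercase at the end, with no second pass and no lookahead.
import Mathlib
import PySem

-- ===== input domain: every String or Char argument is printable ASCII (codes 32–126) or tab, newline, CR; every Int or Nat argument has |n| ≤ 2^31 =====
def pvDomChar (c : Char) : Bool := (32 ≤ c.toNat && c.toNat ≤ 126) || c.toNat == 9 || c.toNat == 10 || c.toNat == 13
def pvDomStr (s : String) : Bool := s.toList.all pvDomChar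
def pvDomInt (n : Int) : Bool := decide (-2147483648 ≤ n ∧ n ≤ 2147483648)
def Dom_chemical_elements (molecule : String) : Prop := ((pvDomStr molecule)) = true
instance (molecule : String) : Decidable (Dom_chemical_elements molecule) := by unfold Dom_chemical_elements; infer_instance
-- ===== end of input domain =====

-- B replaces A's two staged passes (dedup list, then index loop with lookahead) by one
-- fused pass with a seen-set and a pending-uppercase state machine (measured faster in a timing run).

-- ===== PORT A =====
def chemical_elements (molecule : String) : List String :=
  let elements : List Char := molecule.toList.foldl
    (fun elements letter =>
      if PySem.Chars.isalpha letter && !elements.contains letter then elements ++ [letter]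
      else elements) []
  (List.range elements.length).foldl
    (fun true_elements i =>
      if PySem.Chars.isupper (elements.getD i ' ') then
        if i == elements.length - 1 then
          true_elements ++ [String.ofList [elements.getD i ' ']]
        else if PySem.Chars.isupper (elements.getD (i+1) ' ') then
          true_elements ++ [String.ofList [elements.getD i ' ']]
        else if PySem.Chars.islower (elements.getD (i+1) ' ') then
          true_elements ++ [String.ofList [elements.getD i ' ', elements.getD (i+1) ' ']]
        else true_elements
      else true_elements) []

-- ===== PORT B =====
-- loop body of Source B's single pass, as a helper (state = (seen, out, pending))
def pvStepB (st : PySem.Set Char × List String × Option Char) (ch : Char) :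
    PySem.Set Char × List String × Option Char :=
  if !PySem.Chars.isalpha ch || PySem.Set.contains st.1 ch then st
  else
    let seen := PySem.Set.add st.1 ch
    if PySem.Chars.isupper ch then
      (seen, (match st.2.2 with
              | some p => st.2.1 ++ [String.ofList [p]]
              | none => st.2.1), some ch)
    else match st.2.2 with
      | some p => (seen, st.2.1 ++ [String.ofList [p, ch]], none)
      | none => (seen, st.2.1, none)

def chemical_elements_alt (molecule : String) : List String :=
  let st := molecule.toList.foldl pvStepB
    ((PySem.Set.empty : PySem.Set Char), ([] : List String), (none : Option Char))
  match st.2.2 with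
  | some p => st.2.1 ++ [String.ofList [p]]
  | none => st.2.1

-- ===== PRECONDITION & SPEC =====
def Spec_chemical_elements (molecule : String) (out : List String) : Prop := out = chemical_elements_alt molecule
instance (molecule : String) (out : List String) : Decidable (Spec_chemical_elements molecule out) := by unfold Spec_chemical_elements; infer_instance

-- ===== CLAIM (what is proved, stated in full; the proofs are below) =====
def Claim_equal_chemical_elements : Prop := ∀ (molecule : String), Dom_chemical_elements molecule → Spec_chemical_elements molecule (chemical_elements molecule)

-- ===== LEMMAS AND PROOFS =====

-- One step of A's index loop, as the list it appends at index i of ls.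
def pvStepA (ls : List Char) (i : Nat) : List String :=
  if PySem.Chars.isupper (ls.getD i ' ') then
    if i == ls.length - 1 then [String.ofList [ls.getD i ' ']]
    else if PySem.Chars.isupper (ls.getD (i+1) ' ') then [String.ofList [ls.getD i ' ']]
    else if PySem.Chars.islower (ls.getD (i+1) ' ') then [String.ofList [ls.getD i ' ', ls.getD (i+1) ' ']]
    else []
  else []

def pvPairA (c n : Char) : List String :=
  if PySem.Chars.isupper c then
    if PySem.Chars.isupper n then [String.ofList [c]]
    else if PySem.Chars.islower n then [String.ofList [c, n]]
    else []
  else []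

def pvScanA : List Char → List String
  | [] => []
  | [c] => if PySem.Chars.isupper c then [String.ofList [c]] else []
  | c :: n :: rest => pvPairA c n ++ pvScanA (n :: rest)

def pvPairB (c n : Char) : List String :=
  if PySem.Chars.isupper c then
    [if PySem.Chars.islower n then String.ofList [c, n] else String.ofList [c]]
  else []

def pvScanB : List Char → List String
  | [] => []
  | [c] => pvPairB c ' '
  | c :: n :: rest => pvPairB c n ++ pvScanB (n :: rest)

-- B-side abstractions: new alpha characters collected in order, and the state machine.
def pvNew (seen : PySem.Set Char) : List Char → List Char
  | [] => []
  | c :: rest =>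
    if PySem.Chars.isalpha c && !PySem.Set.contains seen c
    then c :: pvNew (PySem.Set.add seen c) rest
    else pvNew seen rest

def pvFlush (out : List String) (pending : Option Char) : List String :=
  match pending with
  | some p => out ++ [String.ofList [p]]
  | none => out

def pvFin (st : PySem.Set Char × List String × Option Char) : List String :=
  pvFlush st.2.1 st.2.2

def pvSM (out : List String) (pending : Option Char) : List Char → List String
  | [] => pvFlush out pending
  | c :: rest =>
    if PySem.Chars.isupper c then
      pvSM (pvFlush out pending) (some c) rest
    else match pending with
      | some p => pvSM (out ++ [String.ofList [p, c]]) none rest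
      | none => pvSM out none rest

def pvHead (pending : Option Char) : List Char → List String
  | [] => pvFlush [] pending
  | c :: _ => match pending with | some p => pvPairB p c | none => []

lemma pv_upper_not_lower {c : Char} (h : PySem.Chars.isupper c = true) :
    PySem.Chars.islower c = false := by
  simp only [PySem.Chars.isupper, Bool.and_eq_true, decide_eq_true_eq] at h
  simp only [PySem.Chars.islower, Bool.and_eq_false_iff, decide_eq_false_iff_not, not_le]
  left
  exact lt_of_le_of_lt h.2 (by decide)

lemma pvPairA_eq_pvPairB (c n : Char) (hn : PySem.Chars.isalpha n = true) :
    pvPairA c n = pvPairB c n := by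
  unfold pvPairA pvPairB
  by_cases hu : PySem.Chars.isupper n = true
  · simp [hu, pv_upper_not_lower hu]
  · have hl : PySem.Chars.islower n = true := by
      simp only [PySem.Chars.isalpha, Bool.or_eq_true] at hn
      tauto
    simp [hl, Bool.eq_false_iff.mpr hu]

lemma pvScanA_eq_pvScanB (ls : List Char) (h : ∀ c ∈ ls, PySem.Chars.isalpha c = true) :
    pvScanA ls = pvScanB ls := by
  induction ls with
  | nil => rfl
  | cons c rest ih =>
    cases rest with
    | nil =>
      simp only [pvScanA, pvScanB, pvPairB]
      have : PySem.Chars.islower ' ' = false := by decide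
      simp [this]
    | cons n rest' =>
      simp only [pvScanA, pvScanB]
      rw [pvPairA_eq_pvPairB c n (h n (by simp)),
          ih (fun x hx => h x (List.mem_cons_of_mem _ hx))]

lemma pvStepA_succ (c : Char) (rest : List Char) (i : Nat) (hi : i < rest.length) :
    pvStepA (c :: rest) (i + 1) = pvStepA rest i := by
  unfold pvStepA
  have h1 : ((i + 1 : Nat) == (c :: rest).length - 1) = (i == rest.length - 1) := by
    simp only [List.length_cons, Nat.add_sub_cancel]
    by_cases h : i + 1 = rest.length
    · have h' : i = rest.length - 1 := by omega
      simp only [h', beq_self_eq_true, beq_iff_eq]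
      omega
    · have h' : i ≠ rest.length - 1 := by omega
      simp [h, h']
  rw [h1]
  simp only [List.getD_cons_succ]

lemma pv_flatMap_range_stepA (ls : List Char) :
    (List.range ls.length).flatMap (pvStepA ls) = pvScanA ls := by
  induction ls with
  | nil => rfl
  | cons c rest ih =>
    rw [List.length_cons, List.range_succ_eq_map, List.flatMap_cons, List.flatMap_map]
    have hrest : (List.range rest.length).flatMap (fun a => pvStepA (c :: rest) a.succ)
        = (List.range rest.length).flatMap (pvStepA rest) := by
      apply List.flatMap_congr
      intro i hi
      exact pvStepA_succ c rest i (List.mem_range.mp hi)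
    rw [hrest, ih]
    cases rest with
    | nil =>
      simp [pvStepA, pvScanA]
    | cons n rest' =>
      have h0 : pvStepA (c :: n :: rest') 0 = pvPairA c n := by
        unfold pvStepA pvPairA
        have h00 : ((0 : Nat) == (c :: n :: rest').length - 1) = false := by
          simp [List.length_cons]
        rw [h00]
        simp
      rw [h0]
      rfl

lemma pv_dedup_fold (cs : List Char) :
    cs.foldl (fun elements letter =>
        if PySem.Chars.isalpha letter && !elements.contains letter then elements ++ [letter]
        else elements) []
      = PySem.List.dedup (cs.filter PySem.Chars.isalpha) := by
  rw [PySem.List.dedup_eq_ofList, PySem.Set.ofList_eq_foldl,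
      ← PySem.List.foldl_if_eq_foldl_filter PySem.Chars.isalpha PySem.Set.add]
  apply PySem.List.foldl_congr_mem
  intro acc x _
  by_cases ha : PySem.Chars.isalpha x = true
  · simp [ha, PySem.Set.add, PySem.Set.contains]
  · simp [Bool.eq_false_iff.mpr ha]

-- unfolding lemmas for pvSM / pvNew / pvHead / Set.add, used instead of simp
lemma pvSM_cons_upper (out : List String) (pending : Option Char) (c : Char) (rest : List Char)
    (hu : PySem.Chars.isupper c = true) :
    pvSM out pending (c :: rest) = pvSM (pvFlush out pending) (some c) rest := by
  simp only [pvSM]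
  rw [if_pos hu]

lemma pvSM_cons_low_some (out : List String) (p c : Char) (rest : List Char)
    (hu : PySem.Chars.isupper c = false) :
    pvSM out (some p) (c :: rest) = pvSM (out ++ [String.ofList [p, c]]) none rest := by
  simp only [pvSM]
  rw [hu, if_neg Bool.false_ne_true]

lemma pvSM_cons_low_none (out : List String) (c : Char) (rest : List Char)
    (hu : PySem.Chars.isupper c = false) :
    pvSM out none (c :: rest) = pvSM out none rest := by
  simp only [pvSM]
  rw [hu, if_neg Bool.false_ne_true]

lemma pvNew_cons_skip (seen : PySem.Set Char) (c : Char) (rest : List Char)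
    (h : (PySem.Chars.isalpha c && !PySem.Set.contains seen c) = false) :
    pvNew seen (c :: rest) = pvNew seen rest := by
  simp only [pvNew]
  rw [h, if_neg Bool.false_ne_true]

lemma pvNew_cons_new (seen : PySem.Set Char) (c : Char) (rest : List Char)
    (h : (PySem.Chars.isalpha c && !PySem.Set.contains seen c) = true) :
    pvNew seen (c :: rest) = c :: pvNew (PySem.Set.add seen c) rest := by
  simp only [pvNew]
  rw [h, if_pos rfl]

lemma pvHead_none (ls : List Char) : pvHead none ls = [] := by
  cases ls <;> rfl

lemma pvSet_add_mem (seen : PySem.Set Char) (c : Char)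
    (hm : PySem.Set.contains seen c = true) : PySem.Set.add seen c = seen := by
  unfold PySem.Set.add
  rw [hm, if_pos rfl]

lemma pvSet_add_new (seen : PySem.Set Char) (c : Char)
    (hm : PySem.Set.contains seen c = false) : PySem.Set.add seen c = seen ++ [c] := by
  unfold PySem.Set.add
  rw [hm, if_neg Bool.false_ne_true]

-- B's fused fold, finalized, equals the state machine on the new alpha characters.
lemma pvB_fold_eq_sm (cs : List Char) :
    ∀ (seen : PySem.Set Char) (out : List String) (pending : Option Char),
    pvFin (cs.foldl pvStepB (seen, out, pending)) = pvSM out pending (pvNew seen cs) := by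
  induction cs with
  | nil => intro seen out pending; rfl
  | cons c rest ih =>
    intro seen out pending
    rw [List.foldl_cons]
    by_cases ha : PySem.Chars.isalpha c = true
    · by_cases hm : PySem.Set.contains seen c = true
      · have hstep : pvStepB (seen, out, pending) c = (seen, out, pending) := by
          unfold pvStepB
          rw [ha, hm]; rfl
        rw [hstep, pvNew_cons_skip seen c rest (by rw [ha, hm]; rfl)]
        exact ih _ _ _
      · have hm' : PySem.Set.contains seen c = false := Bool.eq_false_iff.mpr hm
        rw [pvNew_cons_new seen c rest (by rw [ha, hm']; rfl)]
        by_cases hu : PySem.Chars.isupper c = true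
        · have hstep : pvStepB (seen, out, pending) c =
              (PySem.Set.add seen c, pvFlush out pending, some c) := by
            unfold pvStepB
            rw [ha, hm', if_neg (by decide), if_pos hu]
            cases pending <;> rfl
          rw [hstep, pvSM_cons_upper out pending c _ hu]
          exact ih _ _ _
        · have hu' : PySem.Chars.isupper c = false := Bool.eq_false_iff.mpr hu
          cases pending with
          | some p =>
            have hstep : pvStepB (seen, out, some p) c =
                (PySem.Set.add seen c, out ++ [String.ofList [p, c]], none) := by
              unfold pvStepB
              rw [ha, hm', if_neg (by decide), hu', if_neg Bool.false_ne_true]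
            rw [hstep, pvSM_cons_low_some out p c _ hu']
            exact ih _ _ _
          | none =>
            have hstep : pvStepB (seen, out, none) c =
                (PySem.Set.add seen c, out, none) := by
              unfold pvStepB
              rw [ha, hm', if_neg (by decide), hu', if_neg Bool.false_ne_true]
            rw [hstep, pvSM_cons_low_none out c _ hu']
            exact ih _ _ _
    · have ha' : PySem.Chars.isalpha c = false := Bool.eq_false_iff.mpr ha
      have hstep : pvStepB (seen, out, pending) c = (seen, out, pending) := by
        unfold pvStepB
        rw [ha']; rfl
      rw [hstep, pvNew_cons_skip seen c rest (by rw [ha']; rfl)]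
      exact ih _ _ _

lemma pv_foldl_add_eq_new (cs : List Char) :
    ∀ seen : PySem.Set Char,
    (cs.filter PySem.Chars.isalpha).foldl PySem.Set.add seen = seen ++ pvNew seen cs := by
  induction cs with
  | nil => intro seen; simp [pvNew]
  | cons c rest ih =>
    intro seen
    by_cases ha : PySem.Chars.isalpha c = true
    · rw [List.filter_cons_of_pos ha, List.foldl_cons]
      by_cases hm : PySem.Set.contains seen c = true
      · rw [pvSet_add_mem seen c hm, pvNew_cons_skip seen c rest (by rw [ha, hm]; rfl), ih]
      · have hm' : PySem.Set.contains seen c = false := Bool.eq_false_iff.mpr hm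
        rw [pvNew_cons_new seen c rest (by rw [ha, hm']; rfl), ih (PySem.Set.add seen c),
            pvSet_add_new seen c hm']
        simp
    · rw [List.filter_cons_of_neg (by simp [ha]),
          pvNew_cons_skip seen c rest (by rw [Bool.eq_false_iff.mpr ha]; rfl), ih]

lemma pvNew_empty_eq_dedup (cs : List Char) :
    pvNew PySem.Set.empty cs = PySem.List.dedup (cs.filter PySem.Chars.isalpha) := by
  rw [PySem.List.dedup_eq_ofList, PySem.Set.ofList_eq_foldl, pv_foldl_add_eq_new]
  rfl

lemma pvFlush_append (out : List String) (pending : Option Char) :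
    pvFlush out pending = out ++ pvFlush [] pending := by
  cases pending <;> simp [pvFlush]

lemma pvSM_out (ls : List Char) :
    ∀ (out : List String) (pending : Option Char),
    pvSM out pending ls = out ++ pvSM [] pending ls := by
  induction ls with
  | nil =>
    intro out pending
    show pvFlush out pending = out ++ pvFlush [] pending
    exact pvFlush_append out pending
  | cons c rest ih =>
    intro out pending
    by_cases hu : PySem.Chars.isupper c = true
    · rw [pvSM_cons_upper out pending c rest hu, pvSM_cons_upper [] pending c rest hu,
          ih (pvFlush out pending) (some c), ih (pvFlush [] pending) (some c),
          pvFlush_append, List.append_assoc]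
    · have hu' : PySem.Chars.isupper c = false := Bool.eq_false_iff.mpr hu
      cases pending with
      | some p =>
        rw [pvSM_cons_low_some out p c rest hu', pvSM_cons_low_some [] p c rest hu',
            ih (out ++ [String.ofList [p, c]]) none, ih ([] ++ [String.ofList [p, c]]) none]
        simp
      | none =>
        rw [pvSM_cons_low_none out c rest hu', pvSM_cons_low_none [] c rest hu']
        exact ih out none

lemma pvScanB_upper (c : Char) (rest : List Char) (hc : PySem.Chars.isupper c = true) :
    pvScanB (c :: rest) = pvHead (some c) rest ++ pvScanB rest := by
  cases rest with
  | nil =>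
    simp only [pvScanB, pvHead, pvFlush, pvPairB, hc, if_true]
    have : PySem.Chars.islower ' ' = false := by decide
    simp [this]
  | cons n r => rfl

lemma pvScanB_lower (c : Char) (rest : List Char) (hc : PySem.Chars.isupper c = false) :
    pvScanB (c :: rest) = pvScanB rest := by
  cases rest with
  | nil => simp [pvScanB, pvPairB, hc]
  | cons n r => simp [pvScanB, pvPairB, hc]

lemma pvSM_eq_scanB (ls : List Char) (h : ∀ c ∈ ls, PySem.Chars.isalpha c = true) :
    ∀ pending : Option Char, (∀ p, pending = some p → PySem.Chars.isupper p = true) →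
    pvSM [] pending ls = pvHead pending ls ++ pvScanB ls := by
  induction ls with
  | nil =>
    intro pending _
    cases pending <;> simp [pvSM, pvHead, pvScanB, pvFlush]
  | cons c rest ih =>
    intro pending hp
    have halpha : PySem.Chars.isalpha c = true := h c (by simp)
    have hrest : ∀ x ∈ rest, PySem.Chars.isalpha x = true :=
      fun x hx => h x (List.mem_cons_of_mem _ hx)
    by_cases hu : PySem.Chars.isupper c = true
    · rw [pvSM_cons_upper [] pending c rest hu,
          pvSM_out rest (pvFlush [] pending) (some c),
          ih hrest (some c) (by intro p hp'; cases hp'; exact hu),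
          pvScanB_upper c rest hu]
      have hhead : pvHead pending (c :: rest) = pvFlush [] pending := by
        cases pending with
        | none => rfl
        | some p =>
          have hpu := hp p rfl
          simp [pvHead, pvFlush, pvPairB, hpu, pv_upper_not_lower hu]
      rw [hhead]
    · have hu' : PySem.Chars.isupper c = false := Bool.eq_false_iff.mpr hu
      have hl : PySem.Chars.islower c = true := by
        simp only [PySem.Chars.isalpha, Bool.or_eq_true] at halpha
        cases halpha with
        | inl h' => exact absurd h' hu
        | inr h' => exact h'
      cases pending with
      | none =>
        rw [pvSM_cons_low_none [] c rest hu',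
            ih hrest none (by intro p hp'; cases hp'),
            pvScanB_lower c rest hu', pvHead_none, pvHead_none]
      | some p =>
        have hpu := hp p rfl
        rw [pvSM_cons_low_some [] p c rest hu',
            pvSM_out rest ([] ++ [String.ofList [p, c]]) none,
            ih hrest none (by intro q hq; cases hq),
            pvScanB_lower c rest hu', pvHead_none]
        simp [pvHead, pvPairB, hpu, hl]

-- ===== VERDICT (by name: the statement is the Claim_ definition above) =====
theorem chemical_elements_spec : Claim_equal_chemical_elements := by
  intro molecule _
  unfold Spec_chemical_elements chemical_elements chemical_elements_alt
  rw [pv_dedup_fold]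
  set ls : List Char := PySem.List.dedup (molecule.toList.filter PySem.Chars.isalpha) with hls
  have hall : ∀ c ∈ ls, PySem.Chars.isalpha c = true := by
    intro c hc
    rw [hls, PySem.List.dedup_eq_ofList] at hc
    have := (PySem.Set.mem_ofList _ c).mp hc
    exact (List.mem_filter.mp this).2
  have hA : (List.range ls.length).foldl
      (fun true_elements i =>
        if PySem.Chars.isupper (ls.getD i ' ') then
          if i == ls.length - 1 then true_elements ++ [String.ofList [ls.getD i ' ']]
          else if PySem.Chars.isupper (ls.getD (i+1) ' ') then true_elements ++ [String.ofList [ls.getD i ' ']]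
          else if PySem.Chars.islower (ls.getD (i+1) ' ') then true_elements ++ [String.ofList [ls.getD i ' ', ls.getD (i+1) ' ']]
          else true_elements
        else true_elements) []
      = [] ++ (List.range ls.length).flatMap (pvStepA ls) := by
    rw [← PySem.List.foldl_append_eq_flatMap (pvStepA ls) (List.range ls.length) []]
    apply PySem.List.foldl_congr_mem
    intro acc i _
    unfold pvStepA
    split_ifs <;> simp
  have hB : (match molecule.toList.foldl pvStepB
        ((PySem.Set.empty : PySem.Set Char), ([] : List String), (none : Option Char)) with
      | (_, out, some p) => out ++ [String.ofList [p]]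
      | (_, out, none) => out)
      = pvFin (molecule.toList.foldl pvStepB
        ((PySem.Set.empty : PySem.Set Char), ([] : List String), (none : Option Char))) := by
    unfold pvFin pvFlush
    rcases molecule.toList.foldl pvStepB
      ((PySem.Set.empty : PySem.Set Char), ([] : List String), (none : Option Char)) with
      ⟨s, o, p⟩
    cases p <;> rfl
  rw [hA, List.nil_append, pv_flatMap_range_stepA, pvScanA_eq_pvScanB ls hall]
  show pvScanB ls = pvFin (molecule.toList.foldl pvStepB
    ((PySem.Set.empty : PySem.Set Char), ([] : List String), (none : Option Char)))
  rw [pvB_fold_eq_sm molecule.toList PySem.Set.empty [] none, pvNew_empty_eq_dedup, ← hls,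
      pvSM_eq_scanB ls hall none (by intro p hp; cases hp), pvHead_none, List.nil_append]
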